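-- pv_equiv track=rewrite | github.com/HosseinPAI/Speech-Recognition-with-Transformer | preparing_data/helper.py | merge_abbreviation
-- ===== SOURCE A (Python) =====
-- def merge_abbreviation(seq):
--     seq = seq.replace("  ", " ")
--     words = seq.split(" ")
--     final_seq = ""
--     temp = ""
--     for i in range(len(words)):
--         word_length = len(words[i])
--         if word_length == 0:  # unknown character case
--             continue
--
--         if words[i][word_length - 1] == ".":
--             temp += words[i]
--         else:
--             if temp != "":
--                 if final_seq != "":
--                     final_seq += " "
--                 final_seq += temp
--                 temp = ""
--             if final_seq != "":
--                 final_seq += " "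
--             final_seq += words[i]
--     if temp != "":
--         if final_seq != "":
--             final_seq += " "
--         final_seq += temp
--     return final_seq
-- ===== SOURCE B (Python) =====
-- def merge_abbreviation(seq):
--     tokens = [w for w in seq.replace("  ", " ").split(" ") if w]
--     if not tokens:
--         return ""
--     parts = [tokens[0]]
--     prev = tokens[0]
--     for cur in tokens[1:]:
--         if not (prev.endswith(".") and cur.endswith(".")):
--             parts.append(" ")
--         parts.append(cur)
--         prev = cur
--     return "".join(parts)
-- ===== Notes on version B (the rewrite author's own statement) =====
-- stated objective: alternative
-- what changed: Replaces A's accumulate-and-flush state machine (final_seq/temp buffers with conditional flushes) by tokenize-filter-then-join: build the nonempty token list once, then join adjacent tokens with a per-gap separator ('' when both neighbours end in '.', else ' ').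
import Mathlib
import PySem

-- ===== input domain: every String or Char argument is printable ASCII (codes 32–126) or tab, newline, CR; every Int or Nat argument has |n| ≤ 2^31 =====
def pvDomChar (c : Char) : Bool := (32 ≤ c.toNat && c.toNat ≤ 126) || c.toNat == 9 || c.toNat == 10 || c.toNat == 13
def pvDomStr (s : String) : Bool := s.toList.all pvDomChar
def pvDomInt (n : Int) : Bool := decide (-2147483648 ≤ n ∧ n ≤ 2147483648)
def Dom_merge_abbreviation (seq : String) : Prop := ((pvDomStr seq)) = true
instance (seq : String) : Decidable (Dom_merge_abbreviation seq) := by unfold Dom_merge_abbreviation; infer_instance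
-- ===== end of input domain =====

-- B replaces A's accumulate-and-flush buffer state machine by tokenize-filter-then-join with a
-- per-gap separator; same cost ("alternative"), equivalence proved on all inputs.

-- ===== PORT A =====
-- A's loop body: state (final_seq, temp); empty words skipped; dot-ending words buffered in temp,
-- others flush temp and append, both with the "space only if nonempty" rule.
def mergeStepA (st : List Char × List Char) (w : List Char) : List Char × List Char :=
  if PySem.Chars.len w = 0 then st
  else if PySem.Chars.pyGet? w (PySem.Chars.len w - 1) = some '.' then (st.1, st.2 ++ w)
  else
    let st1 := if st.2 ≠ [] then ((if st.1 ≠ [] then st.1 ++ [' '] else st.1) ++ st.2, ([] : List Char)) else st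
    ((if st1.1 ≠ [] then st1.1 ++ [' '] else st1.1) ++ w, st1.2)

def merge_abbreviation (seq : String) : String :=
  let s1 := PySem.Chars.replace seq.toList "  ".toList " ".toList
  let words := PySem.Chars.splitOn s1 " ".toList
  let st := words.foldl mergeStepA ([], [])
  String.ofList (if st.2 ≠ [] then (if st.1 ≠ [] then st.1 ++ [' '] else st.1) ++ st.2 else st.1)

-- ===== PORT B =====
-- B's loop body: state (prev, parts); append a " " part unless both neighbours end with ".".
def mergeStepB (st : List Char × List (List Char)) (cur : List Char) : List Char × List (List Char) :=
  let parts := if !(PySem.Chars.endswith st.1 ['.'] && PySem.Chars.endswith cur ['.']) then st.2 ++ [[' ']] else st.2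
  (cur, parts ++ [cur])

def merge_abbreviation_alt (seq : String) : String :=
  let tokens := (PySem.Chars.splitOn (PySem.Chars.replace seq.toList "  ".toList " ".toList) " ".toList).filter (· ≠ [])
  match tokens with
  | [] => ""
  | t0 :: rest => String.ofList (PySem.Chars.join [] (rest.foldl mergeStepB (t0, [t0])).2)

-- ===== PRECONDITION & SPEC =====
def Spec_merge_abbreviation (seq : String) (out : String) : Prop := out = merge_abbreviation_alt seq
instance (seq : String) (out : String) : Decidable (Spec_merge_abbreviation seq out) := by unfold Spec_merge_abbreviation; infer_instance

-- ===== CLAIM (what is proved, stated in full; the proofs are below) =====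
def Claim_equal_merge_abbreviation : Prop := ∀ (seq : String), Dom_merge_abbreviation seq → Spec_merge_abbreviation seq (merge_abbreviation seq)

-- ===== LEMMAS AND PROOFS =====

-- the per-gap join both programs compute, tail form: p = "previous token ends with '.'"
def sepT (p : Bool) : List (List Char) → List Char
  | [] => []
  | c :: r => (if p && PySem.Chars.endswith c ['.'] then [] else [' ']) ++ c ++ sepT (PySem.Chars.endswith c ['.']) r

def mergedTokens : List (List Char) → List Char
  | [] => []
  | c :: r => c ++ sepT (PySem.Chars.endswith c ['.']) r

def finishA (st : List Char × List Char) : List Char :=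
  if st.2 ≠ [] then (if st.1 ≠ [] then st.1 ++ [' '] else st.1) ++ st.2 else st.1

lemma stepA_nil (st : List Char × List Char) : mergeStepA st [] = st := by
  simp [mergeStepA, PySem.Chars.len]

lemma foldA_filter (ws : List (List Char)) (st : List Char × List Char) :
    ws.foldl mergeStepA st = (ws.filter (· ≠ [])).foldl mergeStepA st := by
  induction ws generalizing st with
  | nil => rfl
  | cons w ws ih =>
    by_cases hw : w = []
    · subst hw; simp [stepA_nil, ih]
    · simp [hw, ih]

lemma endswith_eq_getLast? (w : List Char) (hw : w ≠ []) :
    PySem.Chars.endswith w ['.'] = (w.getLast? == some '.') := by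
  obtain ⟨u, a, rfl⟩ := (List.eq_nil_or_concat w).resolve_left hw
  simp only [List.concat_eq_append]
  by_cases ha : a = '.'
  · subst ha
    have h : PySem.Chars.endswith (u ++ ['.']) ['.'] = true :=
      (PySem.Chars.endswith_iff _ _).mpr ⟨u, rfl⟩
    simp [h]
  · have h : ¬ PySem.Chars.endswith (u ++ [a]) ['.'] = true := by
      rw [PySem.Chars.endswith_iff]
      rintro ⟨p, hp⟩
      have h2 := congrArg List.getLast? hp
      simp at h2
      exact ha h2.symm
    simp [Bool.eq_false_iff.mpr h, ha]

lemma condA_eq (w : List Char) (hw : w ≠ []) :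
    (PySem.Chars.pyGet? w (PySem.Chars.len w - 1) = some '.') ↔ PySem.Chars.endswith w ['.'] = true := by
  obtain ⟨u, a, hw2⟩ := (List.eq_nil_or_concat w).resolve_left hw
  simp only [List.concat_eq_append] at hw2
  subst hw2
  have h1 : PySem.Chars.len (u ++ [a]) - 1 = (u.length : Int) := by
    simp [PySem.Chars.len]
  rw [h1]
  simp only [PySem.Chars.pyGet?_eq_listPyGet?]
  rw [show PySem.List.pyGet? (u ++ [a]) (u.length : Int) = some a from
    PySem.List.pyGet?_append_length (pre := u) (y := a) (ys := [])]
  rw [endswith_eq_getLast? _ hw]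
  simp

lemma getLast?_append_right (t c : List Char) (hc : c ≠ []) : (t ++ c).getLast? = c.getLast? := by
  obtain ⟨u, a, rfl⟩ := (List.eq_nil_or_concat c).resolve_left hc
  simp [← List.append_assoc]

lemma foldA_char (L : List (List Char)) (f t : List Char)
    (hL : ∀ w ∈ L, w ≠ []) (ht : t = [] ∨ PySem.Chars.endswith t ['.'] = true) :
    finishA (L.foldl mergeStepA (f, t)) =
      if t = [] then
        (if f = [] then mergedTokens L else f ++ sepT false L)
      else (if f = [] then t else f ++ ' ' :: t) ++ sepT true L := by
  induction L generalizing f t with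
  | nil =>
    simp only [List.foldl_nil, finishA, sepT, mergedTokens]
    by_cases h : t = [] <;> by_cases hf : f = [] <;> simp [h, hf]
  | cons c r ih =>
    have hc : c ≠ [] := hL c (by simp)
    have hr : ∀ w ∈ r, w ≠ [] := fun w hw => hL w (by simp [hw])
    have hlen : ¬ PySem.Chars.len c = 0 := by
      simp [PySem.Chars.len]; exact hc
    by_cases ec : PySem.Chars.endswith c ['.'] = true
    · -- dot-ending word: buffered
      have hcondT : PySem.List.pyGet? c ((c.length : Int) - 1) = some '.' := by
        have h2 := (condA_eq c hc).mpr ec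
        simpa [PySem.Chars.len] using h2
      have hstep : mergeStepA (f, t) c = (f, t ++ c) := by
        simp [mergeStepA, PySem.Chars.len, hc, hcondT]
      have hend : PySem.Chars.endswith (t ++ c) ['.'] = true := by
        rw [endswith_eq_getLast? _ (by simp [hc]), getLast?_append_right t c hc,
          ← endswith_eq_getLast? _ hc]
        exact ec
      rw [List.foldl_cons, hstep, ih f (t ++ c) hr (Or.inr hend)]
      have htc : ¬ t ++ c = [] := by simp [hc]
      by_cases h : t = [] <;> by_cases hf : f = [] <;>
        simp [h, hf, hc, htc, mergedTokens, sepT, ec, List.append_assoc]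
    · -- non-dot word: flush
      have hcond : ¬ (PySem.Chars.pyGet? c (PySem.Chars.len c - 1) = some '.') :=
        fun hx => ec ((condA_eq c hc).mp hx)
      have ec' : PySem.Chars.endswith c ['.'] = false := by simpa using ec
      have hcond' : ¬ PySem.List.pyGet? c ((c.length : Int) - 1) = some '.' := by
        simpa [PySem.Chars.len] using hcond
      by_cases h : t = [] <;> by_cases hf : f = []
      · subst h; subst hf
        have hstep : mergeStepA ([], []) c = (c, []) := by
          simp [mergeStepA, PySem.Chars.len, hc, hcond']
        rw [List.foldl_cons, hstep, ih c [] hr (Or.inl rfl)]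
        simp [hc, mergedTokens, ec']
      · subst h
        have hstep : mergeStepA (f, []) c = (f ++ [' '] ++ c, []) := by
          simp [mergeStepA, PySem.Chars.len, hc, hcond', hf]
        rw [List.foldl_cons, hstep, ih _ [] hr (Or.inl rfl)]
        simp [hf, sepT, ec', List.append_assoc]
      · subst hf
        have hstep : mergeStepA ([], t) c = (t ++ [' '] ++ c, []) := by
          simp [mergeStepA, PySem.Chars.len, hc, hcond', h]
        rw [List.foldl_cons, hstep, ih _ [] hr (Or.inl rfl)]
        simp [h, sepT, ec', List.append_assoc]
      · have hstep : mergeStepA (f, t) c = (f ++ [' '] ++ t ++ [' '] ++ c, []) := by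
          simp [mergeStepA, PySem.Chars.len, hc, hcond', h, hf, List.append_assoc]
        rw [List.foldl_cons, hstep, ih _ [] hr (Or.inl rfl)]
        simp [h, hf, sepT, ec', List.append_assoc]

lemma join_nil_flatten (ps : List (List Char)) : PySem.Chars.join [] ps = ps.flatten := by
  induction ps with
  | nil => rfl
  | cons p ps ih =>
    cases ps with
    | nil => simp [PySem.Chars.join, List.intercalate]
    | cons q qs =>
      simp only [PySem.Chars.join, List.intercalate] at *
      simp_all [List.flatten]

lemma foldB_char (l : List (List Char)) (prev : List Char) (parts : List (List Char)) :
    PySem.Chars.join [] ((l.foldl mergeStepB (prev, parts)).2) =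
      PySem.Chars.join [] parts ++ sepT (PySem.Chars.endswith prev ['.']) l := by
  induction l generalizing prev parts with
  | nil => simp [sepT]
  | cons c l ih =>
    rw [List.foldl_cons]
    show PySem.Chars.join [] ((l.foldl mergeStepB (mergeStepB (prev, parts) c)).2) = _
    by_cases h : (PySem.Chars.endswith prev ['.'] && PySem.Chars.endswith c ['.']) = true
    · have : mergeStepB (prev, parts) c = (c, parts ++ [c]) := by simp [mergeStepB, h]
      rw [this, ih]
      obtain ⟨h1, h2⟩ := Bool.and_eq_true_iff.mp h
      simp [sepT, h1, h2, join_nil_flatten, List.append_assoc]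
    · have : mergeStepB (prev, parts) c = (c, (parts ++ [[' ']]) ++ [c]) := by
        simp [mergeStepB, h]
      rw [this, ih]
      rw [Bool.and_eq_true_iff] at h
      by_cases h1 : PySem.Chars.endswith prev ['.'] = true <;>
      by_cases h2 : PySem.Chars.endswith c ['.'] = true <;>
        simp_all [sepT, join_nil_flatten, List.append_assoc]

-- ===== VERDICT (by name: the statement is the Claim_ definition above) =====
theorem merge_abbreviation_spec : Claim_equal_merge_abbreviation := by
  intro seq _
  show merge_abbreviation seq = merge_abbreviation_alt seq
  unfold merge_abbreviation merge_abbreviation_alt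
  dsimp only
  rw [foldA_filter]
  generalize hg : (PySem.Chars.splitOn (PySem.Chars.replace seq.toList "  ".toList " ".toList)
      " ".toList).filter (· ≠ []) = ws
  have hall : ∀ w ∈ ws, w ≠ [] := by
    intro w hw
    rw [← hg] at hw
    simpa using (List.of_mem_filter hw)
  have hA : finishA (List.foldl mergeStepA ([], []) ws) = mergedTokens ws := by
    rw [foldA_char ws [] [] hall (Or.inl rfl)]
    simp
  cases ws with
  | nil =>
    show String.ofList (finishA (List.foldl mergeStepA ([], []) [])) = _
    rw [hA]
    rfl
  | cons t0 rest =>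
    show String.ofList (finishA (List.foldl mergeStepA ([], []) (t0 :: rest))) =
      String.ofList (PySem.Chars.join [] (List.foldl mergeStepB (t0, [t0]) rest).2)
    rw [hA, foldB_char]
    congr 1
    simp [mergedTokens]
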